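-- pv_equiv track=rewrite | github.com/ilanazane/leetcode | 1980FindUniqueBinaryString.py | findUniqueBinaryString
-- ===== SOURCE A (Python) =====
-- import itertools
--
-- def findUniqueBinaryString(nums):
--     binary = ["01"]
--     n = len(nums[0])
--
--     array = []
--     for i in itertools.product(*binary, repeat=n):
--         combined = "".join(i)
--         array.append(combined)
--
--     not_in_array = []
--     for i in array:
--         if i not in nums:
--             not_in_array.append(i)
--
--     return not_in_array
-- ===== SOURCE B (Python) =====
-- def _is_binary(s, n):
--     return len(s) == n and all(c in '01' for c in s)
--
-- def _value(s):
--     v = 0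
--     for c in s:
--         v = 2 * v + (c == '1')
--     return v
--
-- def findUniqueBinaryString(nums):
--     # Only length-n binary strings in nums can ever be hit; convert those to
--     # integers, sort them, and emit the gaps between consecutive present values
--     # directly -- no membership test per candidate.
--     n = len(nums[0])
--     present = sorted({_value(s) for s in nums if _is_binary(s, n)})
--     out = []
--     nxt = 0
--     for v in present + [1 << n]:
--         for i in range(nxt, v):
--             out.append(format(i, '0{}b'.format(n)))
--         nxt = v + 1
--     return out
-- ===== Notes on version B (the rewrite author's own statement) =====
-- stated objective: faster
-- what changed: Instead of generating every length-n string and filtering each by a linear membership scan of nums, B converts the valid length-n binary strings of nums to integers, sorts that set, and emits the missing strings by walking the gaps between consecutive present values, with no per-candidate membership test.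
-- outside the precondition, e.g. on findUniqueBinaryString([]): A raises IndexError, B raises IndexError
import Mathlib
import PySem

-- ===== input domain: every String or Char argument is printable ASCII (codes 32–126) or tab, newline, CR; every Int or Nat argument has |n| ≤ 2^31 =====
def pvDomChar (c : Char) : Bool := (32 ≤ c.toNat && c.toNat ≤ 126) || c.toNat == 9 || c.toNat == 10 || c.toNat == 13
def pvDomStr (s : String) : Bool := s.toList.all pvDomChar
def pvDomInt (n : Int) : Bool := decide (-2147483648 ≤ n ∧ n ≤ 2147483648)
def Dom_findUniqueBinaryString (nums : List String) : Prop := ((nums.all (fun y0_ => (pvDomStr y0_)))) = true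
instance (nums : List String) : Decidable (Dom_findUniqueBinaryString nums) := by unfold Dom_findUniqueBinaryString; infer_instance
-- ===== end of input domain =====

-- B replaces generate-all-then-linear-filter with: convert the valid length-n binary strings
-- of nums to integers, sort that set, and emit the missing strings by walking the gaps
-- between consecutive present values, with no per-candidate membership scan (measured faster).

-- ===== PORT A =====
-- itertools.product(*["01"], repeat=n): tuples over "01", leftmost position varies slowest
def pvProdA : Nat → List (List Char)
  | 0 => [[]]
  | n + 1 => ['0', '1'].flatMap (fun c => (pvProdA n).map (fun t => c :: t))

def findUniqueBinaryString (nums : List String) : List String :=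
  let n := (nums.headD "").length   -- len(nums[0]); Pre_ excludes nums = [] (IndexError)
  let array := (pvProdA n).map (fun t => String.ofList t)   -- "".join(i)
  array.foldl (fun acc s => if !(nums.contains s) then acc ++ [s] else acc) []

-- ===== PORT B =====
-- _is_binary(s, n)
def pvIsBin (s : List Char) (n : Nat) : Bool :=
  s.length == n && s.all (fun c => c = '0' || c = '1')

-- _value(s): v = 2*v + (c == '1') over s
def pvValue (s : List Char) : Nat :=
  s.foldl (fun v c => 2 * v + (if c = '1' then 1 else 0)) 0

-- format(i, '0{n}b'): width-n zero-padded binary; exact for the 0 ≤ i < 2^n this port feeds it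
def pvFmt (n i : Nat) : List Char :=
  (List.range n).map (fun k => if (i >>> (n - 1 - k)) &&& 1 == 1 then '1' else '0')

def findUniqueBinaryString_alt (nums : List String) : List String :=
  let n := (nums.headD "").length   -- len(nums[0]); raises on [] like A, outside Pre_
  let present : List Nat :=
    PySem.List.sorted
      (PySem.Set.ofList ((nums.filter (fun s => pvIsBin s.toList n)).map (fun s => pvValue s.toList)))
      (fun x => x)
  -- for v in present + [1 << n]: for i in range(nxt, v): out.append(format(i,...)); nxt = v + 1
  ((present ++ [2 ^ n]).foldl
      (fun (st : Nat × List String) v =>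
        (v + 1, st.2 ++ (List.range' st.1 (v - st.1)).map (fun i => String.ofList (pvFmt n i))))
      (0, [])).2

-- ===== PRECONDITION & SPEC =====
-- nums = [] raises IndexError at nums[0] in both Pythons
def Pre_findUniqueBinaryString (nums : List String) : Prop := nums ≠ []
instance (nums : List String) : Decidable (Pre_findUniqueBinaryString nums) := by
  unfold Pre_findUniqueBinaryString; infer_instance
def pvWitness_findUniqueBinaryString : List String := ["0"]

def Spec_findUniqueBinaryString (nums : List String) (out : List String) : Prop := out = findUniqueBinaryString_alt nums
instance (nums : List String) (out : List String) : Decidable (Spec_findUniqueBinaryString nums out) := by unfold Spec_findUniqueBinaryString; infer_instance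

-- ===== CLAIM (what is proved, stated in full; the proofs are below) =====
def Claim_equal_findUniqueBinaryString : Prop := ∀ (nums : List String), Dom_findUniqueBinaryString nums → Pre_findUniqueBinaryString nums → Spec_findUniqueBinaryString nums (findUniqueBinaryString nums)

-- ===== LEMMAS AND PROOFS =====

-- the low half of range(2^(n+1)) gets a leading '0'
theorem pvFmt_succ_lo (n i : Nat) (hi : i < 2 ^ n) :
    pvFmt (n + 1) i = '0' :: pvFmt n i := by
  unfold pvFmt
  rw [List.range_succ_eq_map, List.map_cons, List.map_map]
  congr 1
  · simp [Nat.shiftRight_eq_div_pow, Nat.div_eq_of_lt hi]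
  · refine List.map_congr_left (fun k _ => ?_)
    simp only [Function.comp]
    have h : n + 1 - 1 - (k + 1) = n - 1 - k := by omega
    rw [h]

-- the high half gets a leading '1' over the same tail
theorem pvFmt_succ_hi (n i : Nat) (hi : i < 2 ^ n) :
    pvFmt (n + 1) (2 ^ n + i) = '1' :: pvFmt n i := by
  unfold pvFmt
  rw [List.range_succ_eq_map, List.map_cons, List.map_map]
  congr 1
  · have h1 : (2 ^ n + i) / 2 ^ n = 1 := by
      have := Nat.two_pow_pos n
      exact Nat.div_eq_of_lt_le (by omega) (by omega)
    simp [Nat.shiftRight_eq_div_pow, h1]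
  · refine List.map_congr_left (fun k hk => ?_)
    have hk' : k < n := List.mem_range.mp hk
    have hj : n - 1 - k < n := by omega
    have hsplit : 2 ^ n = 2 ^ (n - 1 - k) * (2 * 2 ^ (n - 1 - (n - 1 - k))) := by
      rw [← pow_succ']
      rw [← pow_add]
      congr 1
      omega
    simp only [Function.comp, Nat.shiftRight_eq_div_pow, Nat.and_one_is_mod]
    have hn : n + 1 - 1 - (k + 1) = n - 1 - k := by omega
    rw [hn, hsplit, Nat.mul_add_div (Nat.two_pow_pos _), Nat.mul_comm 2,
      Nat.add_comm, Nat.add_mul_mod_self_right]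

-- B's formatted numbers, in counting order, are exactly A's product list
theorem pvFmt_eq_prodA : ∀ n, (List.range (2 ^ n)).map (pvFmt n) = pvProdA n := by
  intro n
  induction n with
  | zero => decide
  | succ n ih =>
    have h2 : 2 ^ (n + 1) = 2 ^ n + 2 ^ n := by rw [pow_succ]; omega
    rw [h2, List.range_add, List.map_append, List.map_map]
    have hlo : (List.range (2 ^ n)).map (pvFmt (n + 1)) =
        (pvProdA n).map (fun t => '0' :: t) := by
      rw [← ih, List.map_map]
      exact List.map_congr_left (fun i hi => pvFmt_succ_lo n i (List.mem_range.mp hi))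
    have hhi : (List.range (2 ^ n)).map (pvFmt (n + 1) ∘ (fun x => 2 ^ n + x)) =
        (pvProdA n).map (fun t => '1' :: t) := by
      rw [← ih, List.map_map]
      exact List.map_congr_left (fun i hi => pvFmt_succ_hi n i (List.mem_range.mp hi))
    rw [hlo, hhi]
    conv_rhs => rw [pvProdA]
    simp

-- pvValue with an arbitrary accumulator
theorem pvValue_foldl (s : List Char) (a : Nat) :
    s.foldl (fun v c => 2 * v + (if c = '1' then 1 else 0)) a = a * 2 ^ s.length + pvValue s := by
  induction s generalizing a with
  | nil => simp [pvValue]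
  | cons c t ih =>
    simp only [pvValue, List.foldl_cons, List.length_cons] at *
    rw [ih, ih (2 * 0 + _), pow_succ]
    ring

-- roundtrip: a binary word of length n has value < 2^n and formats back to itself
theorem pvValue_roundtrip (s : List Char) (hbin : s.all (fun c => c = '0' || c = '1') = true) :
    pvValue s < 2 ^ s.length ∧ pvFmt s.length (pvValue s) = s := by
  induction s with
  | nil => exact ⟨by decide, by decide⟩
  | cons c t ih =>
    simp only [List.all_cons, Bool.and_eq_true] at hbin
    obtain ⟨hc, ht⟩ := hbin
    obtain ⟨hlt, hfmt⟩ := ih ht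
    have hv : pvValue (c :: t) = (if c = '1' then 1 else 0) * 2 ^ t.length + pvValue t := by
      have : pvValue (c :: t) = List.foldl (fun v c => 2 * v + (if c = '1' then 1 else 0)) (2 * 0 + (if c = '1' then 1 else 0)) t := by
        simp only [pvValue, List.foldl_cons]
      rw [this, pvValue_foldl]
      norm_num
    rcases (show c = '0' ∨ c = '1' by simpa using hc) with h | h
    · subst h
      have hz : (if ('0' : Char) = '1' then (1 : Nat) else 0) = 0 := by decide
      rw [List.length_cons, hv, hz, zero_mul, zero_add]
      exact ⟨lt_trans hlt (by rw [pow_succ]; omega),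
        by rw [pvFmt_succ_lo t.length (pvValue t) hlt, hfmt]⟩
    · subst h
      have ho : (if ('1' : Char) = '1' then (1 : Nat) else 0) = 1 := by decide
      rw [List.length_cons, hv, ho, one_mul]
      exact ⟨by rw [pow_succ]; omega,
        by rw [pvFmt_succ_hi t.length (pvValue t) hlt, hfmt]⟩

-- A's product list is strictly increasing in lexicographic order
theorem pvProdA_pairwise : ∀ n, (pvProdA n).Pairwise (fun a b : List Char => a < b) := by
  intro n
  induction n with
  | zero => simp [pvProdA]
  | succ n ih =>
    simp only [pvProdA, List.flatMap_cons, List.flatMap_nil, List.append_nil]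
    rw [List.pairwise_append]
    refine ⟨?_, ?_, ?_⟩
    · rw [List.pairwise_map]; exact ih.imp (fun h => by simpa using h)
    · rw [List.pairwise_map]; exact ih.imp (fun h => by simpa using h)
    · intro a ha b hb
      obtain ⟨a', -, rfl⟩ := List.mem_map.mp ha
      obtain ⟨b', -, rfl⟩ := List.mem_map.mp hb
      show ('0' :: a' : List Char) < '1' :: b'
      simp [List.cons_lt_cons_iff]

-- length and binariness of a formatted number
theorem pvFmt_isBin (n i : Nat) : pvIsBin (pvFmt n i) n = true := by
  simp only [pvIsBin, pvFmt, Bool.and_eq_true, List.all_map, List.all_eq_true]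
  refine ⟨by simp, fun k _ => ?_⟩
  by_cases h : (i >>> (n - 1 - k)) &&& 1 == 1
  · rw [Function.comp_apply, if_pos h]; decide
  · rw [Function.comp_apply, if_neg h]; decide

-- value(format(n, i)) = i for i < 2^n
theorem pvValue_pvFmt (n i : Nat) (hi : i < 2 ^ n) : pvValue (pvFmt n i) = i := by
  have hbin : (pvFmt n i).all (fun c => c = '0' || c = '1') = true := by
    have := pvFmt_isBin n i
    simp only [pvIsBin, Bool.and_eq_true] at this
    exact this.2
  have hlen : (pvFmt n i).length = n := by simp [pvFmt]
  obtain ⟨hlt, hfmt⟩ := pvValue_roundtrip (pvFmt n i) hbin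
  rw [hlen] at hlt hfmt
  -- pvFmt n is injective on [0, 2^n): its image is pvProdA n, which is nodup
  have hnodup : ((List.range (2 ^ n)).map (pvFmt n)).Nodup := by
    rw [pvFmt_eq_prodA]
    exact (pvProdA_pairwise n).imp ne_of_lt
  have hinj := List.inj_on_of_nodup_map hnodup
  exact hinj (List.mem_range.mpr hlt) (List.mem_range.mpr hi) hfmt

-- B's gap-walking fold emits exactly the numbers of [nxt, B) missing from S
theorem pvGapFold (n : Nat) (S : List Nat) :
    ∀ (nxt : Nat) (acc : List String) (B : Nat),
      S.Pairwise (· < ·) → (∀ v ∈ S, nxt ≤ v ∧ v < B) →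
      ((S ++ [B]).foldl
          (fun (st : Nat × List String) v =>
            (v + 1, st.2 ++ (List.range' st.1 (v - st.1)).map (fun i => String.ofList (pvFmt n i))))
          (nxt, acc)).2
        = acc ++ ((List.range' nxt (B - nxt)).filter (fun i => !(S.contains i))).map
            (fun i => String.ofList (pvFmt n i)) := by
  induction S with
  | nil =>
    intro nxt acc B _ _
    simp [List.foldl_cons]
  | cons v T ih =>
    intro nxt acc B hpw hbnd
    obtain ⟨hnv, hvB⟩ := hbnd v (by simp)
    have hTgt : ∀ w ∈ T, v < w := (List.pairwise_cons.mp hpw).1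
    rw [List.cons_append, List.foldl_cons,
      ih (v + 1) _ B (List.pairwise_cons.mp hpw).2
        (fun w hw => ⟨hTgt w hw, (hbnd w (List.mem_cons_of_mem v hw)).2⟩)]
    have hsplit : List.range' nxt (B - nxt)
        = List.range' nxt (v - nxt) ++ v :: List.range' (v + 1) (B - (v + 1)) := by
      have h1 : List.range' nxt (v - nxt) ++ List.range' (nxt + (v - nxt)) (B - v)
          = List.range' nxt ((v - nxt) + (B - v)) := List.range'_append_1
      have h2 : nxt + (v - nxt) = v := by omega
      have h3 : (v - nxt) + (B - v) = B - nxt := by omega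
      have h4 : B - v = (B - (v + 1)) + 1 := by omega
      rw [h2, h3] at h1
      rw [← h1, h4, List.range'_succ]
    rw [hsplit, List.filter_append, List.filter_cons]
    have hlow : (List.range' nxt (v - nxt)).filter (fun i => !((v :: T).contains i))
        = List.range' nxt (v - nxt) := by
      refine List.filter_eq_self.mpr (fun i hi => ?_)
      have hiv : i < v := by
        have := (List.mem_range'_1.mp hi).2
        omega
      have hnm : i ∉ v :: T := by
        intro hmem
        rcases List.mem_cons.mp hmem with h | h
        · omega
        · exact absurd (hTgt i h) (by omega)
      have hcon : ((v :: T).contains i) = false := by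
        rw [← Bool.not_eq_true, List.contains_iff_mem]
        exact hnm
      rw [hcon]
      rfl
    have hv : (!((v :: T).contains v)) = false := by
      simp
    have hhigh : (List.range' (v + 1) (B - (v + 1))).filter (fun i => !((v :: T).contains i))
        = (List.range' (v + 1) (B - (v + 1))).filter (fun i => !(T.contains i)) := by
      refine List.filter_congr (fun i hi => ?_)
      have hiv : v < i := (List.mem_range'_1.mp hi).1
      simp only [List.contains_cons]
      have : (i == v) = false := by rw [beq_eq_false_iff_ne]; omega
      rw [this, Bool.false_or]
    rw [hlow, hv, hhigh]
    simp [List.map_append, List.append_assoc]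

-- membership bridge: for i < 2^n, "format(i) in nums" is "i among the values of nums"
theorem pvContains_bridge (nums : List String) (n i : Nat) (hi : i < 2 ^ n) :
    nums.contains (String.ofList (pvFmt n i))
      = ((nums.filter (fun s => pvIsBin s.toList n)).map (fun s => pvValue s.toList)).contains i := by
  rw [Bool.eq_iff_iff, List.contains_iff_mem, List.contains_iff_mem]
  constructor
  · intro hmem
    refine List.mem_map.mpr ⟨String.ofList (pvFmt n i), List.mem_filter.mpr ⟨hmem, ?_⟩, ?_⟩
    · rw [String.toList_ofList]
      exact pvFmt_isBin n i
    · rw [String.toList_ofList]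
      exact pvValue_pvFmt n i hi
  · intro hmem
    obtain ⟨s, hs, hval⟩ := List.mem_map.mp hmem
    obtain ⟨hsnums, hsbin⟩ := List.mem_filter.mp hs
    have hb := (Bool.and_eq_true _ _).mp hsbin
    have hlen : s.toList.length = n := eq_of_beq hb.1
    obtain ⟨-, hfmt⟩ := pvValue_roundtrip s.toList hb.2
    rw [hval, hlen] at hfmt
    rw [hfmt, String.ofList_toList]
    exact hsnums

-- ===== VERDICT (by name: the statement is the Claim_ definition above) =====
theorem findUniqueBinaryString_spec : Claim_equal_findUniqueBinaryString := by
  intro nums _ _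
  unfold Spec_findUniqueBinaryString findUniqueBinaryString findUniqueBinaryString_alt
  simp only []
  set n := (nums.headD "").length with hn
  set P : List Nat := (nums.filter (fun s => pvIsBin s.toList n)).map (fun s => pvValue s.toList) with hP
  set str : Nat → String := fun i => String.ofList (pvFmt n i) with hstr
  -- A's side: filter of the full product list
  have hA : ((pvProdA n).map (fun t => String.ofList t)).foldl
      (fun acc s => if !(nums.contains s) then acc ++ [s] else acc) []
      = ((List.range (2 ^ n)).filter (fun i => !(nums.contains (str i)))).map str := by
    have h1 : ((pvProdA n).map (fun t => String.ofList t)).foldl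
        (fun acc s => if !(nums.contains s) then acc ++ [s] else acc) []
        = ((pvProdA n).map (fun t => String.ofList t)).filter (fun s => !(nums.contains s)) := by
      simpa using PySem.List.foldl_append_if_eq_filter (fun s => !(nums.contains s))
        ((pvProdA n).map (fun t => String.ofList t)) []
    rw [h1, ← pvFmt_eq_prodA n, List.map_map, List.filter_map]
    rfl
  -- every value in P is < 2^n
  have hPlt : ∀ a ∈ P, a < 2 ^ n := by
    intro a ha
    obtain ⟨s, hs, hval⟩ := List.mem_map.mp ha
    obtain ⟨-, hsbin⟩ := List.mem_filter.mp hs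
    have hb := (Bool.and_eq_true _ _).mp hsbin
    have hlen : s.toList.length = n := eq_of_beq hb.1
    have := (pvValue_roundtrip s.toList hb.2).1
    rw [hlen] at this
    omega
  -- B's sorted present list is the increasing enumeration of P's values
  set R : List Nat := (List.range (2 ^ n)).filter (fun i => P.contains i) with hR
  have hSort : PySem.List.sorted (PySem.Set.ofList P) (fun x => x) = R := by
    refine PySem.List.sorted_eq_of_perm_of_pairwise_lt (PySem.Set.ofList P) R (fun x => x) ?_ ?_
    · refine (List.perm_ext_iff_of_nodup ((List.nodup_range).filter _) (PySem.Set.nodup_ofList P)).mpr ?_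
      intro a
      rw [PySem.Set.mem_ofList, List.mem_filter, List.mem_range, List.contains_iff_mem]
      exact ⟨fun h => h.2, fun h => ⟨hPlt a h, h⟩⟩
    · exact List.Pairwise.filter _ List.pairwise_lt_range
  rw [hSort]
  -- B's gap walk emits the complement of R below 2^n
  have hRbnd : ∀ v ∈ R, 0 ≤ v ∧ v < 2 ^ n := by
    intro v hv
    exact ⟨Nat.zero_le v, List.mem_range.mp (List.mem_filter.mp hv).1⟩
  have hB := pvGapFold n R 0 [] (2 ^ n) (List.Pairwise.filter _ List.pairwise_lt_range) hRbnd
  rw [hB]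
  rw [Nat.sub_zero, ← List.range_eq_range', List.nil_append]
  -- the two filters agree pointwise on range (2^n)
  rw [hA]
  refine congrArg (List.map str) (List.filter_congr (fun i hi => ?_)) |>.symm
  have hilt : i < 2 ^ n := List.mem_range.mp hi
  have hcb := pvContains_bridge nums n i hilt
  rw [← hP] at hcb
  have hRc : R.contains i = P.contains i := by
    rw [Bool.eq_iff_iff, List.contains_iff_mem, List.contains_iff_mem, hR, List.mem_filter]
    constructor
    · intro h
      exact (List.contains_iff_mem).mp h.2
    · intro h
      exact ⟨List.mem_range.mpr hilt, (List.contains_iff_mem).mpr h⟩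
  rw [hRc, ← hcb]
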